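-- pv_equiv track=rewrite | github.com/Takuya-ops/Algorithm_practice | generator_practice.py | func
-- ===== SOURCE A (Python) =====
-- from typing import List
--
-- def func(num: int) -> List[int]:
--   numbers = []
--   for i in range(num+1):
--     if i%2 == 0:
--       numbers.append(i)
--     else:
--       continue
--   return numbers
-- ===== SOURCE B (Python) =====
-- from typing import List
--
-- def func(num: int) -> List[int]:
--   # Walk DOWN from the largest even <= num to 0 in even steps (no parity test
--   # per element), then reverse once to get ascending order.
--   out = []
--   m = num - num % 2
--   while m >= 0:
--     out.append(m)
--     m -= 2
--   out.reverse()
--   return out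
-- ===== Notes on version B (the rewrite author's own statement) =====
-- stated objective: alternative
-- what changed: Instead of scanning every integer from zero to num and filtering by parity, B starts at the largest even value not exceeding num and walks downward even-to-even collecting values with no per-element parity test, then reverses the list once.
import Mathlib
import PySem

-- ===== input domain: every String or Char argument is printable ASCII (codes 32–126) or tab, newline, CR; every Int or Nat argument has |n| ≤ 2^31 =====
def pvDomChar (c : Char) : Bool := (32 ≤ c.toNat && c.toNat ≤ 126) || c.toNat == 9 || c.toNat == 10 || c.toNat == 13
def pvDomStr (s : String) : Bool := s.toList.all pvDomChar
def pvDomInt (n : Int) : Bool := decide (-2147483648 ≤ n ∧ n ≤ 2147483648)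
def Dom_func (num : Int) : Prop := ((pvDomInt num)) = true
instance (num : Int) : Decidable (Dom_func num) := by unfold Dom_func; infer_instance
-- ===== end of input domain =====

-- B walks down from the largest even ≤ num in even steps and reverses once (no per-element parity test).

-- ===== PORT A =====
def func (num : Int) : List Int :=
  (PySem.List.pyRange 0 (num + 1) 1).foldl
    (fun numbers i => if PySem.Int.mod i 2 = 0 then numbers ++ [i] else numbers) []

-- ===== PORT B =====
-- the descending while-loop of Source B
def funcAltLoop (m : Int) (out : List Int) : List Int :=
  if 0 ≤ m then funcAltLoop (m - 2) (out ++ [m]) else out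
termination_by (m + 2).toNat
decreasing_by omega

def func_alt (num : Int) : List Int :=
  (funcAltLoop (num - PySem.Int.mod num 2) []).reverse

-- ===== PRECONDITION & SPEC =====
def Spec_func (num : Int) (out : List Int) : Prop := out = func_alt num
instance (num : Int) (out : List Int) : Decidable (Spec_func num out) := by unfold Spec_func; infer_instance

-- ===== CLAIM (what is proved, stated in full; the proofs are below) =====
def Claim_equal_func : Prop := ∀ (num : Int), Dom_func num → Spec_func num (func num)

-- ===== LEMMAS AND PROOFS =====

-- the even members of range(t+1), in Nat
lemma evens_range (t : Nat) :
    (List.range (t + 1)).filter (fun k => k % 2 == 0) =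
    (List.range (t / 2 + 1)).map (fun k => 2 * k) := by
  induction t with
  | zero => decide
  | succ n ih =>
    have hrs : List.range (n + 1 + 1) = List.range (n + 1) ++ [n + 1] := List.range_succ
    rw [hrs, List.filter_append, ih]
    by_cases h : (n + 1) % 2 = 0
    · have h2 : (n + 1) / 2 + 1 = n / 2 + 1 + 1 := by omega
      have hrs2 : List.range (n / 2 + 1 + 1) = List.range (n / 2 + 1) ++ [n / 2 + 1] :=
        List.range_succ
      have hv : n + 1 = 2 * (n / 2 + 1) := by omega
      rw [h2, hrs2, List.map_append]
      simp [hv]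
    · have h2 : (n + 1) / 2 = n / 2 := by omega
      rw [h2]
      simp [h]

-- B's descending loop from 2k appends the evens 0..2k in descending order
lemma funcAltLoop_eq (k : Nat) (out : List Int) :
    funcAltLoop (2 * (k : Int)) out =
    out ++ (((List.range (k + 1)).map (fun j => 2 * j)).map (Nat.cast : Nat → Int)).reverse := by
  induction k generalizing out with
  | zero =>
    rw [funcAltLoop]
    simp
    rw [funcAltLoop]
    simp
  | succ n ih =>
    rw [funcAltLoop]
    have h2 : 2 * (((n : Nat) + 1 : Nat) : Int) - 2 = 2 * (n : Int) := by push_cast; ring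
    rw [if_pos (by positivity), h2, ih]
    have hrs : List.range (n + 1 + 1) = List.range (n + 1) ++ [n + 1] := List.range_succ
    rw [hrs, List.map_append, List.map_append, List.reverse_append]
    simp only [List.map_cons, List.map_nil, List.reverse_cons, List.reverse_nil,
      List.nil_append, List.append_assoc, List.cons_append]
    push_cast
    ring_nf

-- ===== VERDICT (by name: the statement is the Claim_ definition above) =====
theorem func_spec : Claim_equal_func := by
  intro num _
  unfold Spec_func func func_alt
  by_cases hpos : 0 ≤ num
  · obtain ⟨t, rfl⟩ : ∃ t : Nat, num = (t : Int) := ⟨num.toNat, by omega⟩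
    -- A side: filter of the full range
    rw [PySem.List.foldl_append_ite_eq_filter]
    have hr1 : PySem.List.pyRange 0 ((t : Int) + 1) 1
        = (List.range (t + 1)).map (Nat.cast : Nat → Int) := by
      have h := PySem.List.pyRange_zero_natCast (t + 1)
      rw [Nat.cast_add, Nat.cast_one] at h
      exact h
    have hcond : ((fun i : Int => decide (PySem.Int.mod i 2 = 0)) ∘ (Nat.cast : Nat → Int))
        = (fun k : Nat => k % 2 == 0) := by
      funext k
      have hm : PySem.Int.mod (k : Int) 2 = (k : Int) % 2 :=
        PySem.Int.mod_eq_emod_of_pos (by norm_num)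
      have hiff : PySem.Int.mod (k : Int) 2 = 0 ↔ k % 2 = 0 := by rw [hm]; omega
      simp only [Function.comp_apply, hiff]
      rfl
    rw [hr1, List.filter_map, hcond, evens_range]
    -- B side: start value is 2*(t/2)
    have hm : PySem.Int.mod (t : Int) 2 = (t : Int) % 2 :=
      PySem.Int.mod_eq_emod_of_pos (by norm_num)
    have hstart : (t : Int) - PySem.Int.mod (t : Int) 2 = 2 * ((t / 2 : Nat) : Int) := by
      rw [hm]; omega
    rw [hstart, funcAltLoop_eq]
    simp [List.map_map]
  · -- num < 0 : A's range is empty and B's loop exits immediately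
    have h1 : PySem.List.pyRange 0 (num + 1) 1 = [] :=
      PySem.List.pyRange_one_eq_nil (by omega)
    have hm0 := PySem.Int.mod_nonneg (a := num) (b := 2) (by norm_num)
    have hneg : num - PySem.Int.mod num 2 < 0 := by omega
    rw [h1, funcAltLoop, if_neg (by omega)]
    rfl
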